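-- pv_equiv track=rewrite | github.com/myaji35/15_CertiGraph | backend/app/services/parser/structured_pdf_parser.py | _remove_table_text_from_question
-- ===== SOURCE A (Python) =====
-- from typing import List, Dict, Any, Optional, Tuple
--
-- def _remove_table_text_from_question(question: str, table: List[List[str]]) -> str:
--     """질문에서 표 내용 제거"""
--     lines = question.split('\n')
--     cleaned_lines = []
--     skip_mode = False
--
--     for line in lines:
--         # 표 내용이 포함된 줄 스킵
--         is_table_line = False
--         for row in table:
--             for cell in row:
--                 if cell and len(cell) > 2 and cell in line:
--                     is_table_line = True
--                     skip_mode = True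
--                     break
--             if is_table_line:
--                 break
--
--         if not is_table_line:
--             if skip_mode and line.strip() == '':
--                 skip_mode = False
--                 continue
--             if not skip_mode:
--                 cleaned_lines.append(line)
--
--     return '\n'.join(cleaned_lines).strip()
-- ===== SOURCE B (Python) =====
-- def _remove_table_text_from_question(question, table):
--     """질문에서 표 내용 제거"""
--     # flatten usable cell patterns once
--     patterns = [cell for row in table for cell in row if cell and len(cell) > 2]
--     lines = question.split('\n')
--     kept = []
--     i, n = 0, len(lines)
--     while i < n:
--         line = lines[i]
--         if any(p in line for p in patterns):
--             # table block: drop it and everything up to (and including)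
--             # the first blank line that is not itself a table line
--             i += 1
--             while i < n and (lines[i].strip() != '' or any(p in lines[i] for p in patterns)):
--                 i += 1
--             i += 1
--         else:
--             kept.append(line)
--             i += 1
--     return '\n'.join(kept).strip()
-- ===== Notes on version B (the rewrite author's own statement) =====
-- stated objective: alternative
-- what changed: B flattens the usable table cells (len>2) into one pattern list built once and replaces A's per-line nested row/cell scan plus skip_mode flag with a flagless two-phase index loop: an outer keep-loop and an inner loop that skips the table block up to its blank-line terminator.
import Mathlib
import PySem

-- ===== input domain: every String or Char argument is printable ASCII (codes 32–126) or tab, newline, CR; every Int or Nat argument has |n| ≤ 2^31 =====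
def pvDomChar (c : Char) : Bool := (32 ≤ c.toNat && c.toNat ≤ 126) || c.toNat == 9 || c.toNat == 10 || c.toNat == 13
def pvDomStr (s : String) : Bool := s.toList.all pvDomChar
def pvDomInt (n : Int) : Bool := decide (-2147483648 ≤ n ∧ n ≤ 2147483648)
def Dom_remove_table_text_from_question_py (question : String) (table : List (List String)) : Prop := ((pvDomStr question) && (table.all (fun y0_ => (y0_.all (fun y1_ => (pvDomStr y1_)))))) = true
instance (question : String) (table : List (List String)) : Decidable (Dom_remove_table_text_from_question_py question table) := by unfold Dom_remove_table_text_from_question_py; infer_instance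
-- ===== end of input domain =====

-- B flattens the usable cells once and replaces A's skip_mode flag by a flagless
-- two-level scan (outer keep-loop, inner skip-loop); objective: alternative structure.


-- ===== PORT A =====
-- `cell and len(cell) > 2 and cell in line` for one cell
def aCellHit (cell line : String) : Bool :=
  decide (0 < PySem.Str.len cell) && decide (2 < PySem.Str.len cell) && PySem.Str.isIn cell line
-- the nested `for row in table: for cell in row: … break` loops (short-circuit = any)
def aIsTableLine (table : List (List String)) (line : String) : Bool :=
  table.any (fun row => row.any (fun cell => aCellHit cell line))
-- loop body over (cleaned_lines, skip_mode)
def aStep (table : List (List String)) (s : List String × Bool) (line : String) : List String × Bool :=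
  if aIsTableLine table line then (s.1, true)
  else if s.2 && (PySem.Chars.strip line.toList).isEmpty then (s.1, false)
  else if !s.2 then (s.1 ++ [line], s.2)
  else s

def remove_table_text_from_question_py (question : String) (table : List (List String)) : String :=
  let lines := (PySem.Str.split? question "\n").getD []
  let st := lines.foldl (aStep table) ([], false)
  PySem.Str.strip (PySem.Str.join "\n" st.1)

-- ===== PORT B =====
-- patterns = [cell for row in table for cell in row if cell and len(cell) > 2]
def bPatterns (table : List (List String)) : List String :=
  table.flatMap (fun row => row.filter (fun cell =>
    decide (0 < PySem.Str.len cell) && decide (2 < PySem.Str.len cell)))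
-- any(p in line for p in patterns)
def bIsTableLine (patterns : List String) (line : String) : Bool :=
  patterns.any (fun p => PySem.Str.isIn p line)

mutual
-- the outer while-loop phase: keep lines until a table line is hit
def bKeep (patterns : List String) : List String → List String
  | [] => []
  | line :: rest =>
      if bIsTableLine patterns line then bSkip patterns rest
      else line :: bKeep patterns rest
-- the inner while-loop phase: drop lines while (nonblank or table), consume the blank terminator
def bSkip (patterns : List String) : List String → List String
  | [] => []
  | line :: rest =>
      if !(PySem.Chars.strip line.toList).isEmpty || bIsTableLine patterns line then
        bSkip patterns rest
      else bKeep patterns rest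
end

def remove_table_text_from_question_py_alt (question : String) (table : List (List String)) : String :=
  let lines := (PySem.Str.split? question "\n").getD []
  PySem.Str.strip (PySem.Str.join "\n" (bKeep (bPatterns table) lines))

-- ===== PRECONDITION & SPEC =====
def Spec_remove_table_text_from_question_py (question : String) (table : List (List String)) (out : String) : Prop := out = remove_table_text_from_question_py_alt question table
instance (question : String) (table : List (List String)) (out : String) : Decidable (Spec_remove_table_text_from_question_py question table out) := by unfold Spec_remove_table_text_from_question_py; infer_instance

-- ===== CLAIM (what is proved, stated in full; the proofs are below) =====
def Claim_equal_remove_table_text_from_question_py : Prop := ∀ (question : String) (table : List (List String)), Dom_remove_table_text_from_question_py question table → Spec_remove_table_text_from_question_py question table (remove_table_text_from_question_py question table)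

-- ===== LEMMAS AND PROOFS =====

-- B's flattened-pattern test equals A's nested-loops test
theorem isTableLine_eq (table : List (List String)) (line : String) :
    bIsTableLine (bPatterns table) line = aIsTableLine table line := by
  unfold bIsTableLine bPatterns aIsTableLine aCellHit
  induction table with
  | nil => rfl
  | cons row rest ih =>
      simp only [List.flatMap_cons, List.any_append, List.any_cons, ih, List.any_filter]

-- loop invariant: A's fold from (acc, skip) produces acc ++ (B's phase for that skip flag)
theorem fold_eq_phases (table : List (List String)) (lines : List String) :
    ∀ acc : List String,
      (lines.foldl (aStep table) (acc, false)).1 = acc ++ bKeep (bPatterns table) lines ∧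
      (lines.foldl (aStep table) (acc, true)).1 = acc ++ bSkip (bPatterns table) lines := by
  induction lines with
  | nil => intro acc; simp [bKeep, bSkip]
  | cons line rest ih =>
      intro acc
      by_cases ht : aIsTableLine table line
      · simp only [List.foldl_cons, aStep, ht, if_true, bKeep, bSkip, isTableLine_eq,
          Bool.or_true]
        exact ⟨(ih acc).2, (ih acc).2⟩
      · by_cases hb : (PySem.Chars.strip line.toList).isEmpty
        · constructor
          · simp only [List.foldl_cons, aStep, ht, Bool.false_and, Bool.not_false,
              if_true, bKeep, isTableLine_eq]
            have := (ih (acc ++ [line])).1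
            simpa [List.append_assoc] using this
          · simp only [List.foldl_cons, aStep, ht, Bool.true_and, hb, if_true,
              bSkip, isTableLine_eq, Bool.or_false, Bool.not_eq_true']
            exact (ih acc).1
        · constructor
          · simp only [List.foldl_cons, aStep, ht, Bool.false_and, Bool.not_false,
              if_true, bKeep, isTableLine_eq]
            have := (ih (acc ++ [line])).1
            simpa [List.append_assoc] using this
          · simp only [List.foldl_cons, aStep, ht, Bool.true_and, hb, Bool.not_true,
              bSkip, isTableLine_eq, Bool.or_false]
            simpa [hb] using (ih acc).2

-- ===== VERDICT (by name: the statement is the Claim_ definition above) =====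
theorem remove_table_text_from_question_py_spec : Claim_equal_remove_table_text_from_question_py := by
  intro question table _
  show _ = _
  have h := (fold_eq_phases table ((PySem.Str.split? question "\n").getD []) []).1
  simp only [List.nil_append] at h
  simp only [remove_table_text_from_question_py, remove_table_text_from_question_py_alt, h]
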